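-- pv_equiv track=rewrite | github.com/Matthew-Curreri-Porfolio/EmePath | tools/unblock_qmarks.py | auto_repair_qmarks
-- ===== SOURCE A (Python) =====
-- def auto_repair_qmarks(text: str, replacement: str = 'Unknown') -> str:
--     # Replace any run of >=2 question marks with a neutral token
--     out = []
--     i = 0
--     while i < len(text):
--         if text[i] == '?':
--             j = i
--             while j < len(text) and text[j] == '?':
--                 j += 1
--             run_len = j - i
--             if run_len >= 2:
--                 out.append(f'({replacement})')
--             else:
--                 out.append('?')
--             i = j
--         else:
--             out.append(text[i])
--             i += 1
--     return ''.join(out)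
-- ===== SOURCE B (Python) =====
-- def auto_repair_qmarks(text: str, replacement: str = 'Unknown') -> str:
--     # Stage 1: split the text on '?' — a run of k question marks shows up as
--     # k boundaries (k-1 empty segments between them).  Stage 2: fold over the
--     # segments after the first with a boundary counter: when a non-empty
--     # segment (or the end) closes a run of size run, emit '?' for run == 1
--     # and the token for run >= 2, then the segment verbatim.
--     segs = text.split('?')
--     out = [segs[0]]
--     run = 0
--     for seg in segs[1:]:
--         run += 1
--         if seg:
--             out.append('?' if run == 1 else f'({replacement})')
--             out.append(seg)
--             run = 0
--     if run:
--         out.append('?' if run == 1 else f'({replacement})')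
--     return ''.join(out)
-- ===== Notes on version B (the rewrite author's own statement) =====
-- stated objective: faster
-- what changed: Replaces A's character-by-character index loop with an inner run scan by two stages: str.split on the question-mark separator turns each run of k question marks into k segment boundaries, then a fold over the segments with a boundary counter emits a single question mark or the token when a non-empty segment (or the end) closes a run.
import Mathlib
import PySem

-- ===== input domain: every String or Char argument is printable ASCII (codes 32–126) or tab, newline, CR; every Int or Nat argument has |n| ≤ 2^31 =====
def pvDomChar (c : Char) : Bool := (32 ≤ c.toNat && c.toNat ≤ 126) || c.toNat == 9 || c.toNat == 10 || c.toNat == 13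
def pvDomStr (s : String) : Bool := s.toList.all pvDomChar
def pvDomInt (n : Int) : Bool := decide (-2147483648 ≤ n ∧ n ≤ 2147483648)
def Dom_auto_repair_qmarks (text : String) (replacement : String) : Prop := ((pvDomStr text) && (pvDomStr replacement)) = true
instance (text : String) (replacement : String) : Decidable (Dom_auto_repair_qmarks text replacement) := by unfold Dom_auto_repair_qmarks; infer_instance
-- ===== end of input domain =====

-- B replaces A's character-level index loop (with an inner '?'-run scan) by two
-- stages: split on '?', then a fold over the segments with a boundary counter;
-- objective: faster by a constant factor (the split runs in C, no per-char loop).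


-- ===== PORT A =====
-- A's outer while over index i, ported as recursion over the remaining
-- characters: at a '?', the inner while 'while j < len and text[j] == "?"'
-- is the takeWhile scan, run_len = 1 + (length scanned past i), and 'i = j'
-- is continuing with the dropWhile suffix; otherwise one character is
-- emitted and i advances by one.  Exact on every input.
def pvLoopA (repl : List Char) : List Char → List Char
  | [] => []
  | c :: rest =>
    if c = '?' then
      let runLen := 1 + (rest.takeWhile (· == '?')).length
      (if 2 ≤ runLen then '(' :: (repl ++ [')']) else ['?']) ++
        pvLoopA repl (rest.dropWhile (· == '?'))
    else
      c :: pvLoopA repl rest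
termination_by cs => cs.length
decreasing_by
  · simpa using Nat.lt_succ_of_le (rest.dropWhile_sublist (· == '?')).length_le
  · simp

def auto_repair_qmarks (text : String) (replacement : String) : String :=
  String.ofList (pvLoopA replacement.toList text.toList)

-- ===== PORT B =====
-- hand port of Python's str.split('?') over the character list: splits at
-- every '?', keeping empty segments; exact for this non-empty separator.
def pvSplitQ : List Char → List (List Char)
  | [] => [[]]
  | c :: rest =>
    if c = '?' then [] :: pvSplitQ rest
    else
      match pvSplitQ rest with
      | s :: ss => (c :: s) :: ss
      | [] => [[c]]

-- "'?' if run == 1 else f'({replacement})'"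
def pvEmitRun (repl : List Char) (run : Nat) : List Char :=
  if run = 1 then ['?'] else '(' :: (repl ++ [')'])

-- B's for-loop over segs[1:] with the boundary counter run, plus the final
-- 'if run:' flush (the [] case).
def pvLoopB (repl : List Char) : Nat → List (List Char) → List Char
  | run, [] => if 0 < run then pvEmitRun repl run else []
  | run, seg :: rest =>
    if seg ≠ [] then pvEmitRun repl (run + 1) ++ seg ++ pvLoopB repl 0 rest
    else pvLoopB repl (run + 1) rest

def auto_repair_qmarks_alt (text : String) (replacement : String) : String :=
  let segs := pvSplitQ text.toList
  String.ofList (segs.headI ++ pvLoopB replacement.toList 0 segs.tail)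

-- ===== PRECONDITION & SPEC =====
def Spec_auto_repair_qmarks (text : String) (replacement : String) (out : String) : Prop := out = auto_repair_qmarks_alt text replacement
instance (text : String) (replacement : String) (out : String) : Decidable (Spec_auto_repair_qmarks text replacement out) := by unfold Spec_auto_repair_qmarks; infer_instance

-- ===== CLAIM (what is proved, stated in full; the proofs are below) =====
def Claim_equal_auto_repair_qmarks : Prop := ∀ (text : String) (replacement : String), Dom_auto_repair_qmarks text replacement → Spec_auto_repair_qmarks text replacement (auto_repair_qmarks text replacement)

-- ===== LEMMAS AND PROOFS =====

-- the split never produces an empty list of segments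
lemma pvSplitQ_ne_nil : ∀ cs : List Char, pvSplitQ cs ≠ []
  | [] => by simp [pvSplitQ]
  | c :: rest => by
      rw [pvSplitQ]
      by_cases hc : c = '?'
      · simp [hc]
      · simp only [hc, if_false]
        cases h : pvSplitQ rest <;> simp

-- Combined invariant, by strong induction on the length of cs:
-- (T) A's loop equals B's headI-plus-fold on cs;
-- (L) after at least one consumed '?', B's fold with counter run over the
--     split of cs emits the total run (run + 1 + leading '?'s of cs) and
--     continues like A on the rest.
lemma pv_key (repl : List Char) : ∀ (N : Nat) (cs : List Char), cs.length ≤ N →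
    (pvLoopA repl cs = (pvSplitQ cs).headI ++ pvLoopB repl 0 (pvSplitQ cs).tail) ∧
    (∀ run, pvLoopB repl run (pvSplitQ cs) =
      pvEmitRun repl (run + 1 + (cs.takeWhile (· == '?')).length) ++
        pvLoopA repl (cs.dropWhile (· == '?'))) := by
  intro N
  induction N with
  | zero =>
    intro cs h
    have : cs = [] := List.eq_nil_of_length_eq_zero (Nat.le_zero.mp h)
    subst this
    constructor
    · simp [pvLoopA, pvSplitQ, pvLoopB]
    · intro run
      simp [pvSplitQ, pvLoopB, pvLoopA]
  | succ n ih =>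
    intro cs h
    match cs with
    | [] =>
      constructor
      · simp [pvLoopA, pvSplitQ, pvLoopB]
      · intro run
        simp [pvSplitQ, pvLoopB, pvLoopA]
    | c :: rest =>
      have hlen : rest.length ≤ n := by simpa using h
      by_cases hc : c = '?'
      · subst hc
        have hL := (ih rest hlen).2
        constructor
        · -- T
          rw [pvLoopA, if_pos rfl]
          have hsplit : pvSplitQ ('?' :: rest) = [] :: pvSplitQ rest := by
            rw [pvSplitQ]; simp
          rw [hsplit]
          simp only [List.headI, List.tail, List.nil_append]
          rw [hL 0]
          set k := (rest.takeWhile (· == '?')).length with hk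
          by_cases hk0 : k = 0
          · simp [pvEmitRun, hk0]
          · have : 2 ≤ 1 + k := by omega
            have h1 : ¬ (0 + 1 + k = 1) := by omega
            simp [pvEmitRun, this, hk0]
        · -- L
          intro run
          have hsplit : pvSplitQ ('?' :: rest) = [] :: pvSplitQ rest := by
            rw [pvSplitQ]; simp
          rw [hsplit, pvLoopB]
          simp only [ne_eq, not_true_eq_false, if_false]
          rw [hL (run + 1)]
          have ht : (('?' :: rest).takeWhile (· == '?')) = '?' :: rest.takeWhile (· == '?') := by
            simp [List.takeWhile]
          have hd : (('?' :: rest).dropWhile (· == '?')) = rest.dropWhile (· == '?') := by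
            simp [List.dropWhile]
          rw [ht, hd]
          congr 2
          simp
          omega
      · -- c ≠ '?'
        have hT := (ih rest hlen).1
        obtain ⟨s, ss, hrs⟩ := List.exists_cons_of_ne_nil (pvSplitQ_ne_nil rest)
        have hsplit : pvSplitQ (c :: rest) = (c :: s) :: ss := by
          rw [pvSplitQ]
          simp only [hc, if_false, hrs]
        have hTrest : pvLoopA repl rest = s ++ pvLoopB repl 0 ss := by
          rw [hT, hrs]; rfl
        constructor
        · rw [pvLoopA, if_neg hc, hsplit]
          simp only [List.headI, List.tail, List.cons_append]
          rw [hTrest]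
        · intro run
          rw [hsplit, pvLoopB]
          simp only [ne_eq, reduceCtorEq, not_false_eq_true, if_true]
          have hcq : ((c == '?') = false) := by simpa using hc
          have ht : ((c :: rest).takeWhile (· == '?')) = [] := by
            simp [List.takeWhile, hcq]
          have hd : ((c :: rest).dropWhile (· == '?')) = c :: rest := by
            simp [List.dropWhile, hcq]
          rw [ht, hd, pvLoopA, if_neg hc]
          simp [hTrest]

-- ===== VERDICT (by name: the statement is the Claim_ definition above) =====
theorem auto_repair_qmarks_spec : Claim_equal_auto_repair_qmarks := by
  intro text replacement _
  unfold Spec_auto_repair_qmarks auto_repair_qmarks auto_repair_qmarks_alt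
  rw [(pv_key replacement.toList text.toList.length text.toList le_rfl).1]
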